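-- pv_equiv track=rewrite | github.com/Lucas-Jun/TDA-TP-Juegos-de-Hermanos | backtracking_interactivo_2.py | verificar_espacio_en_columnas
-- ===== SOURCE A (Python) =====
-- def verificar_espacio_en_columnas(tablero, barco, demanda_columnas, orientacion):
--     m = len(tablero[0])
--     if orientacion == "H":
--         contador = 0
--         for col in range(m):
--             if demanda_columnas[col] > 0:
--                 contador += 1
--                 if contador >= barco:
--                     return col
--             else:
--                 contador = 0
--     else:
--         for col in range(m):
--             if demanda_columnas[col] >= barco:
--                 return col
--
--     return m
-- ===== SOURCE B (Python) =====
-- def verificar_espacio_en_columnas(tablero, barco, demanda_columnas, orientacion):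
--     m = len(tablero[0])
--     if orientacion == "H":
--         need = max(barco, 1)
--         # stage 1: materialise the maximal runs of consecutive positive demands as (start, length)
--         runs = []
--         start = None
--         for i, v in enumerate(demanda_columnas[:m]):
--             if v > 0:
--                 if start is None:
--                     start = i
--             else:
--                 if start is not None:
--                     runs.append((start, i - start))
--                 start = None
--         if start is not None:
--             runs.append((start, m - start))
--         # stage 2: the first run long enough gives the answer
--         for s, l in runs:
--             if l >= need:
--                 return s + need - 1
--         return m
--     hits = [i for i, v in enumerate(demanda_columnas[:m]) if v >= barco]
--     return hits[0] if hits else m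
-- ===== Notes on version B (the rewrite author's own statement) =====
-- stated objective: alternative
-- what changed: Replaces A's single-pass counter with early return by a staged computation: first build the list of maximal runs of consecutive positive demands as (start, length) pairs, then scan the runs and return start + max(barco,1) - 1 for the first run long enough; the vertical branch becomes filter-then-head over enumerate.
-- outside the precondition, e.g. on verificar_espacio_en_columnas([[0, 0, 0]], 1, [5], 'H'): A returns 0, B returns 0
import Mathlib
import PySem

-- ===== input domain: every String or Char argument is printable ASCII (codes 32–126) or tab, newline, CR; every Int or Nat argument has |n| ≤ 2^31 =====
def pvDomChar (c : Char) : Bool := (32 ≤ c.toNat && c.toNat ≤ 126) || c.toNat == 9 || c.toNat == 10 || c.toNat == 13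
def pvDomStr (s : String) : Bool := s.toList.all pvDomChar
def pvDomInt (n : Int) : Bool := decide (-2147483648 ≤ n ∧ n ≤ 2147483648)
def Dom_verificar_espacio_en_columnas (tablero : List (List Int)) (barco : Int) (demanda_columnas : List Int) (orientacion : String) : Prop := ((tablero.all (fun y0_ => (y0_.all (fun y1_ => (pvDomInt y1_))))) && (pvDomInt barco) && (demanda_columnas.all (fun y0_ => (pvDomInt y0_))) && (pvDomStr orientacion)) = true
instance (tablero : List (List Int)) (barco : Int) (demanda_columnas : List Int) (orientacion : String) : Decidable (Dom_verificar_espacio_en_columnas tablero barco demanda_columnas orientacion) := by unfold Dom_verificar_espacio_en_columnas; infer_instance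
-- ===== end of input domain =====

-- B replaces A's stateful counter/early-return scan by a staged computation: build the list of
-- maximal positive runs first, then scan the runs (objective: alternative decomposition; not faster).

-- ===== PORT A =====
-- the 'H' loop: columns left to scan, contador; some col = early return, none = fall through
def pvALoopH (demanda : List Int) (barco : Int) : List Nat → Int → Option Nat
  | [], _ => none
  | col :: rest, contador =>
    if PySem.List.pyGetD demanda (col : Int) 0 > 0 then
      let contador := contador + 1
      if contador ≥ barco then some col else pvALoopH demanda barco rest contador
    else pvALoopH demanda barco rest 0

-- the 'else' loop
def pvALoopV (demanda : List Int) (barco : Int) : List Nat → Option Nat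
  | [] => none
  | col :: rest =>
    if PySem.List.pyGetD demanda (col : Int) 0 ≥ barco then some col
    else pvALoopV demanda barco rest

def verificar_espacio_en_columnas (tablero : List (List Int)) (barco : Int) (demanda_columnas : List Int) (orientacion : String) : Int :=
  let m := (PySem.List.pyGetD tablero 0 []).length   -- tablero[0]; in range under Pre_
  if orientacion == "H" then
    match pvALoopH demanda_columnas barco (List.range m) 0 with
    | some col => (col : Int)
    | none => (m : Int)
  else
    match pvALoopV demanda_columnas barco (List.range m) with
    | some col => (col : Int)
    | none => (m : Int)

-- ===== PORT B =====
-- stage 1 of Source B: the for-loop over enumerate(demanda[:m]) building runs (start, length),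
-- with the trailing 'if start is not None: runs.append((start, m - start))'
def pvRunsAux (m : Int) : List (Int × Int) → Option Int → List (Int × Int) → List (Int × Int)
  | [], none, runs => runs
  | [], some s, runs => runs ++ [(s, m - s)]
  | (i, v) :: rest, st, runs =>
    if v > 0 then
      pvRunsAux m rest (some (st.getD i)) runs        -- 'if start is None: start = i'
    else
      match st with
      | none => pvRunsAux m rest none runs
      | some s => pvRunsAux m rest none (runs ++ [(s, i - s)])

-- stage 2 of Source B: first run long enough gives start + need - 1
def pvScanRuns (need : Int) : List (Int × Int) → Option Int
  | [] => none
  | (s, l) :: rest => if l ≥ need then some (s + need - 1) else pvScanRuns need rest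

def verificar_espacio_en_columnas_alt (tablero : List (List Int)) (barco : Int) (demanda_columnas : List Int) (orientacion : String) : Int :=
  let m := (PySem.List.pyGetD tablero 0 []).length
  if orientacion == "H" then
    let need := max barco 1
    let runs := pvRunsAux (m : Int) (PySem.List.enumerate (demanda_columnas.take m) 0) none []
    match pvScanRuns need runs with
    | some x => x
    | none => (m : Int)
  else
    -- hits = [i for i, v in enumerate(demanda_columnas[:m]) if v >= barco]; hits[0] if hits else m
    let hits := ((PySem.List.enumerate (demanda_columnas.take m) 0).filter (fun p => decide (p.2 ≥ barco))).map (·.1)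
    match hits.head? with
    | some c => c
    | none => (m : Int)

-- ===== PRECONDITION & SPEC =====
-- Pre_ excludes the inputs where Python A raises: empty tablero (tablero[0] is an IndexError)
-- and demanda_columnas shorter than the first row (IndexError when the scan reaches a missing
-- column; it also excludes short demanda lists on which A happens to return before the missing
-- index — the simple length bound is stated instead of re-simulating the loop).
def Pre_verificar_espacio_en_columnas (tablero : List (List Int)) (barco : Int) (demanda_columnas : List Int) (orientacion : String) : Prop :=
  tablero ≠ [] ∧ (tablero.headD []).length ≤ demanda_columnas.length
instance (tablero : List (List Int)) (barco : Int) (demanda_columnas : List Int) (orientacion : String) : Decidable (Pre_verificar_espacio_en_columnas tablero barco demanda_columnas orientacion) := by unfold Pre_verificar_espacio_en_columnas; infer_instance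

def pvWitness_verificar_espacio_en_columnas : List (List Int) × Int × List Int × String := ([[0]], 1, [1], "H")

def Spec_verificar_espacio_en_columnas (tablero : List (List Int)) (barco : Int) (demanda_columnas : List Int) (orientacion : String) (out : Int) : Prop := out = verificar_espacio_en_columnas_alt tablero barco demanda_columnas orientacion
instance (tablero : List (List Int)) (barco : Int) (demanda_columnas : List Int) (orientacion : String) (out : Int) : Decidable (Spec_verificar_espacio_en_columnas tablero barco demanda_columnas orientacion out) := by unfold Spec_verificar_espacio_en_columnas; infer_instance

-- ===== CLAIM (what is proved, stated in full; the proofs are below) =====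
def Claim_equal_verificar_espacio_en_columnas : Prop := ∀ (tablero : List (List Int)) (barco : Int) (demanda_columnas : List Int) (orientacion : String), Dom_verificar_espacio_en_columnas tablero barco demanda_columnas orientacion → Pre_verificar_espacio_en_columnas tablero barco demanda_columnas orientacion → Spec_verificar_espacio_en_columnas tablero barco demanda_columnas orientacion (verificar_espacio_en_columnas tablero barco demanda_columnas orientacion)


-- ===== LEMMAS AND PROOFS =====

-- the pair list B iterates over, for the suffix of columns starting at index i
def pvPairs (d : List Int) (i k : Nat) : List (Int × Int) :=
  (List.range' i k).map (fun (j : Nat) => ((j : Int), d.getD j 0))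

lemma pvPairs_succ (d : List Int) (i k : Nat) :
    pvPairs d i (k + 1) = ((i : Int), d.getD i 0) :: pvPairs d (i + 1) k := by
  simp [pvPairs, List.range'_succ]

-- the runs accumulator only ever grows by appending on the right
lemma pvRunsAux_acc (M : Int) : ∀ (ps : List (Int × Int)) (st : Option Int) (rs : List (Int × Int)),
    pvRunsAux M ps st rs = rs ++ pvRunsAux M ps st [] := by
  intro ps
  induction ps with
  | nil => intro st rs; cases st <;> simp [pvRunsAux]
  | cons p rest ih =>
    intro st rs
    obtain ⟨i, v⟩ := p
    by_cases hv : v > 0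
    · simp only [pvRunsAux, if_pos hv]; rw [ih, ih (some (st.getD i)) []]
    · cases st with
      | none => simp only [pvRunsAux, if_neg hv]; rw [ih, ih none []]
      | some s =>
        simp only [pvRunsAux, if_neg hv, List.nil_append]
        rw [ih none (rs ++ [(s, i - s)]), ih none [(s, i - s)]]
        simp


-- a run shorter than need is skipped by stage 2
lemma pvScanRuns_skip (need s l : Int) (ts : List (Int × Int)) (h : ¬ l ≥ need) :
    pvScanRuns need ((s, l) :: ts) = pvScanRuns need ts := by
  simp [pvScanRuns, h]

-- with an open run starting at s, the first emitted run is (s, e - s) with e at least i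
lemma pvRunsAux_open (d : List Int) : ∀ (k i : Nat) (s M : Int), ((i : Int)) + ((k : Int)) ≤ M →
    ∃ (e : Int) (tail : List (Int × Int)),
      pvRunsAux M (pvPairs d i k) (some s) [] = (s, e - s) :: tail ∧ (i : Int) ≤ e := by
  intro k
  induction k with
  | zero =>
    intro i s M hM
    exact ⟨M, [], by simp [pvPairs, pvRunsAux], by push_cast at hM; omega⟩
  | succ k ih =>
    intro i s M hM
    rw [pvPairs_succ]
    by_cases hv : d.getD i 0 > 0
    · obtain ⟨e, tail, heq, he⟩ := ih (i + 1) s M (by push_cast at hM ⊢; omega)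
      refine ⟨e, tail, ?_, by push_cast at he ⊢; omega⟩
      simp only [pvRunsAux, if_pos hv, Option.getD_some]
      exact heq
    · refine ⟨(i : Int), pvRunsAux M (pvPairs d (i + 1) k) none [], ?_, le_refl _⟩
      simp only [pvRunsAux, if_neg hv]
      rw [pvRunsAux_acc]
      simp

-- main lemma for the 'H' branch: A's counter loop agrees with B's staged runs computation.
-- contador c is the length of the open positive run ending just before column i.
lemma pvH_main (d : List Int) (b : Int) : ∀ (k i c : Nat),
    c ≤ i → ((c : Int) < max b 1) →
    (∀ j : Nat, i - c ≤ j → j < i → d.getD j 0 > 0) →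
    (match pvALoopH d b (List.range' i k) (c : Int) with
     | some col => some ((col : Int))
     | none => none)
    = pvScanRuns (max b 1)
        (pvRunsAux ((i + k : Nat) : Int) (pvPairs d i k)
          (if c = 0 then none else some ((i : Int) - (c : Int))) []) := by
  intro k
  induction k with
  | zero =>
    intro i c _ hcn _
    by_cases hc : c = 0
    · simp [pvPairs, pvALoopH, pvRunsAux, pvScanRuns, hc]
    · have h1 : ¬ ((i + 0 : Nat) : Int) - ((i : Int) - (c : Int)) ≥ max b 1 := by
        push_cast; omega
      simp only [pvPairs, List.range'_zero, List.map_nil, pvALoopH, if_neg hc, pvRunsAux,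
        List.nil_append]
      rw [pvScanRuns_skip _ _ _ _ h1]
      simp [pvScanRuns]
  | succ k ih =>
    intro i c hci hcn hrun
    rw [List.range'_succ, pvPairs_succ]
    have hst : (if c = 0 then (none : Option Int) else some ((i : Int) - (c : Int))).getD (i : Int)
        = (i : Int) - (c : Int) := by
      by_cases hc : c = 0 <;> simp [hc]
    by_cases hv : d.getD i 0 > 0
    · have hA : pvALoopH d b (i :: List.range' (i + 1) k) ((c : Int)) =
          (if (c : Int) + 1 ≥ b then some i else pvALoopH d b (List.range' (i + 1) k) ((c : Int) + 1)) := by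
        simp only [pvALoopH, PySem.List.pyGetD_natCast]
        rw [if_pos hv]
      have hB0 : pvRunsAux ((i + (k + 1) : Nat) : Int) (((i : Int), d.getD i 0) :: pvPairs d (i + 1) k)
            (if c = 0 then none else some ((i : Int) - (c : Int))) []
          = pvRunsAux ((i + (k + 1) : Nat) : Int) (pvPairs d (i + 1) k) (some ((i : Int) - (c : Int))) [] := by
        simp only [pvRunsAux, if_pos hv, hst]
      rw [hA, hB0]
      by_cases hret : (c : Int) + 1 ≥ b
      · -- A returns i; B's first run starts at i - c and reaches past i
        obtain ⟨e, tail, heq, he⟩ :=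
          pvRunsAux_open d k (i + 1) ((i : Int) - (c : Int)) ((i + (k + 1) : Nat) : Int)
            (by push_cast; omega)
        
        rw [if_pos hret, heq]
        have hm1 : max b 1 ≤ (c : Int) + 1 := max_le hret (by omega)
        have hm2 : (1 : Int) ≤ max b 1 := le_max_right b 1
        have hlong : e - ((i : Int) - (c : Int)) ≥ max b 1 := by push_cast at he; omega
        have hneed : max b 1 = (c : Int) + 1 := by omega
        simp only [pvScanRuns]
        rw [if_pos hlong, hneed]
        congr 1
        ring
      · rw [if_neg hret]
        have h1 : ((c : Int) + 1) = ((c + 1 : Nat) : Int) := by push_cast; ring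
        have h2 : ((i + (k + 1) : Nat) : Int) = (((i + 1) + k : Nat) : Int) := by push_cast; ring
        have h3 : some ((i : Int) - (c : Int)) =
            (if c + 1 = 0 then (none : Option Int) else some (((i + 1 : Nat) : Int) - ((c + 1 : Nat) : Int))) := by
          rw [if_neg (Nat.succ_ne_zero c)]
          congr 1
          push_cast
          ring
        rw [h1, h2, h3]
        exact ih (i + 1) (c + 1) (by omega) (by push_cast; omega)
          (by intro j h1' h2'
              rcases Nat.lt_or_ge j i with hlt | hge
              · exact hrun j (by omega) hlt
              · have : j = i := by omega
                subst this; exact hv)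
    · have hA : pvALoopH d b (i :: List.range' (i + 1) k) ((c : Int)) =
          pvALoopH d b (List.range' (i + 1) k) (((0 : Nat) : Int)) := by
        simp only [pvALoopH, PySem.List.pyGetD_natCast]
        rw [if_neg hv]
        norm_num
      rw [hA]
      have hnext := ih (i + 1) 0 (by omega)
        (by simp only [Nat.cast_zero]; exact lt_of_lt_of_le zero_lt_one (le_max_right b 1))
        (by intro j h1 h2; omega)
      have h2 : ((i + (k + 1) : Nat) : Int) = (((i + 1) + k : Nat) : Int) := by push_cast; ring
      by_cases hc : c = 0
      · simp only [hc] at *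
        simp only [pvRunsAux, if_neg hv]
        rw [h2]
        simpa using hnext
      · simp only [if_neg hc]
        simp only [pvRunsAux, if_neg hv]
        rw [pvRunsAux_acc]
        simp only [List.nil_append, List.singleton_append]
        rw [pvScanRuns_skip _ _ _ _ (by omega), h2]
        simpa using hnext

-- the V branch: first index past the test = head of the filtered enumeration
lemma pvV_main (d : List Int) (b : Int) : ∀ (k i : Nat),
    (match pvALoopV d b (List.range' i k) with
     | some col => some ((col : Int))
     | none => none)
    = (((pvPairs d i k).filter (fun p => decide (p.2 ≥ b))).map (·.1)).head? := by
  intro k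
  induction k with
  | zero => intro i; simp [pvPairs, pvALoopV]
  | succ k ih =>
    intro i
    rw [List.range'_succ, pvPairs_succ]
    by_cases hv : d.getD i 0 ≥ b
    · have hA : pvALoopV d b (i :: List.range' (i + 1) k) = some i := by
        simp only [pvALoopV, PySem.List.pyGetD_natCast]
        rw [if_pos hv]
      rw [hA, List.filter_cons_of_pos (by simpa using hv)]
      simp
    · have hA : pvALoopV d b (i :: List.range' (i + 1) k) = pvALoopV d b (List.range' (i + 1) k) := by
        simp only [pvALoopV, PySem.List.pyGetD_natCast]
        rw [if_neg hv]
      rw [hA, List.filter_cons_of_neg (by simpa using hv)]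
      exact ih (i + 1)

-- B's enumerate over the truncated demand list is exactly pvPairs d 0 m
lemma pvEnum_eq (d : List Int) (m : Nat) (hm : m ≤ d.length) :
    PySem.List.enumerate (d.take m) 0 = pvPairs d 0 m := by
  rw [PySem.List.enumerate_eq_map_pyRange (d.take m) 0]
  have hlen : PySem.List.len (d.take m) = (m : Int) := by
    simp [PySem.List.len, List.length_take]
    omega
  rw [hlen, PySem.List.pyRange_zero_natCast, List.map_map]
  unfold pvPairs
  rw [← List.range_eq_range']
  apply List.map_congr_left
  intro j hj
  rw [List.mem_range] at hj
  simp only [Function.comp, PySem.List.pyGetD_natCast, Prod.mk.injEq, true_and]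
  rw [List.getD_eq_getElem?_getD, List.getD_eq_getElem?_getD, List.getElem?_take]
  simp [hj]

-- ===== VERDICT (by name: the statement is the Claim_ definition above) =====
theorem verificar_espacio_en_columnas_spec : Claim_equal_verificar_espacio_en_columnas := by
  intro tablero barco demanda orientacion _ hpre
  obtain ⟨hne, hlen⟩ := hpre
  unfold Spec_verificar_espacio_en_columnas
  unfold verificar_espacio_en_columnas verificar_espacio_en_columnas_alt
  dsimp only
  have hhead : PySem.List.pyGetD tablero 0 [] = tablero.headD [] := by
    cases tablero with
    | nil => simp at hne
    | cons h t => simp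
  rw [hhead]
  set M := (tablero.headD []).length with hM
  by_cases hH : orientacion == "H"
  · rw [if_pos hH, if_pos hH]
    rw [pvEnum_eq demanda M hlen]
    have h := pvH_main demanda barco M 0 0
      (Nat.le_refl 0)
      (by simp only [Nat.cast_zero]; exact lt_of_lt_of_le zero_lt_one (le_max_right barco 1))
      (by intro j h1 h2; omega)
    norm_num at h
    rw [List.range_eq_range']
    cases hA : pvALoopH demanda barco (List.range' 0 M) 0 with
    | none => rw [hA] at h; rw [← h]
    | some col => rw [hA] at h; rw [← h]
  · rw [if_neg hH, if_neg hH]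
    rw [pvEnum_eq demanda M hlen]
    have h := pvV_main demanda barco M 0
    rw [List.range_eq_range']
    cases hA : pvALoopV demanda barco (List.range' 0 M) with
    | none => rw [hA] at h; rw [← h]
    | some col => rw [hA] at h; rw [← h]
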